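-- pv_equiv track=rewrite | github.com/t0m3kz/franc | src/validation.py | validate_unique_names
-- ===== SOURCE A (Python) =====
-- from collections import Counter
--
-- def validate_unique_names(names: list[str], field_name: str = "Names") -> str | None:
--     """Validate that a list of names contains only unique, non-empty values.
--
--     Args:
--         names: List of name strings to validate for uniqueness
--         field_name: Human-readable name of the field for error messages
--
--     Returns:
--         Error message if names are not unique, None if valid
--
--     Examples:
--         >>> validate_unique_names(["A", "B", "C"], "Interface")
--         None
--         >>> validate_unique_names(["A", "B", "A"], "Interface")
--         'Interfaces must be unique. Duplicates found: A'
--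
--     """
--     # Filter out empty/whitespace-only names and strip whitespace
--     names_clean = [name.strip() for name in names if name.strip()]
--
--     # Use Counter for efficient duplicate detection
--     name_counts = Counter(names_clean)
--     duplicates = [name for name, count in name_counts.items() if count > 1]
--
--     if duplicates:
--         # Ensure proper pluralization
--         plural_field = field_name if field_name.endswith("s") else f"{field_name}s"
--         duplicates_str = ", ".join(sorted(duplicates))
--         return f"{plural_field} must be unique. Duplicates found: {duplicates_str}"
--
--     return None
-- ===== SOURCE B (Python) =====
-- def validate_unique_names(names: list[str], field_name: str = "Names") -> str | None:
--     """Sort-and-scan re-implementation: no Counter, duplicates found by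
--     comparing consecutive elements of the sorted cleaned list."""
--     names_clean = [name.strip() for name in names if name.strip()]
--     ordered = sorted(names_clean)
--     dups = []
--     prev = None
--     for x in ordered:
--         if prev is not None and x == prev and (not dups or dups[-1] != x):
--             dups.append(x)
--         prev = x
--     if dups:
--         plural_field = field_name if field_name.endswith("s") else f"{field_name}s"
--         return f"{plural_field} must be unique. Duplicates found: {', '.join(dups)}"
--     return None
-- ===== Notes on version B (the rewrite author's own statement) =====
-- stated objective: alternative
-- what changed: Replaces the Counter dict and items-filter with sorting the cleaned list and a single scan over consecutive elements that appends a name when it equals its predecessor and is not the last duplicate already recorded, yielding the duplicates directly in sorted order.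
import Mathlib
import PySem

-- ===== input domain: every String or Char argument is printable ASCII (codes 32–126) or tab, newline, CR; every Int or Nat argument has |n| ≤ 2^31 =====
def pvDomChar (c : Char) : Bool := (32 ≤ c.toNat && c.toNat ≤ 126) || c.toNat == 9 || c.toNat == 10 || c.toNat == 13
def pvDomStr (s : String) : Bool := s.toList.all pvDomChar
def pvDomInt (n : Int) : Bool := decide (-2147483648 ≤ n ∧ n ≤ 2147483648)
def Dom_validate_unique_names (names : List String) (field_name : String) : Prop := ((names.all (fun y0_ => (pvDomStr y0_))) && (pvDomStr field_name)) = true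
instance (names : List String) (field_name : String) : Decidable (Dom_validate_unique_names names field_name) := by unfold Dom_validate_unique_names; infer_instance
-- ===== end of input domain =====

-- B replaces A's Counter with sort-then-scan over consecutive elements; same return value (alternative decomposition, no speed claim).

-- ===== PORT A =====
def validate_unique_names (names : List String) (field_name : String) : Option String :=
  let names_clean := (names.filter (fun name => PySem.Str.strip name ≠ "")).map PySem.Str.strip
  let name_counts := PySem.Dict.counter names_clean
  let duplicates := (name_counts.items.filter (fun p => decide ((1 : Int) < p.2))).map (·.1)
  if duplicates ≠ [] then
    let plural_field := if PySem.Str.endswith field_name "s" then field_name else field_name ++ "s"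
    let duplicates_str := PySem.Str.join ", " (PySem.List.sorted duplicates (fun x => x) false)
    some (plural_field ++ " must be unique. Duplicates found: " ++ duplicates_str)
  else
    none

-- ===== PORT B =====
-- one iteration of B's scan loop: state = (dups so far, previous element)
def bstep (st : List String × Option String) (x : String) : List String × Option String :=
  match st.2 with
  | some p => if x = p ∧ (st.1 = [] ∨ st.1.getLast? ≠ some x) then (st.1 ++ [x], some x) else (st.1, some x)
  | none => (st.1, some x)

def validate_unique_names_alt (names : List String) (field_name : String) : Option String :=
  let names_clean := (names.filter (fun name => PySem.Str.strip name ≠ "")).map PySem.Str.strip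
  let ordered := PySem.List.sorted names_clean (fun x => x) false
  let dups := (ordered.foldl bstep ([], none)).1
  if dups ≠ [] then
    let plural_field := if PySem.Str.endswith field_name "s" then field_name else field_name ++ "s"
    some (plural_field ++ " must be unique. Duplicates found: " ++ PySem.Str.join ", " dups)
  else
    none

-- ===== PRECONDITION & SPEC =====
def Spec_validate_unique_names (names : List String) (field_name : String) (out : Option String) : Prop := out = validate_unique_names_alt names field_name
instance (names : List String) (field_name : String) (out : Option String) : Decidable (Spec_validate_unique_names names field_name out) := by unfold Spec_validate_unique_names; infer_instance

-- ===== CLAIM (what is proved, stated in full; the proofs are below) =====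
def Claim_equal_validate_unique_names : Prop := ∀ (names : List String) (field_name : String), Dom_validate_unique_names names field_name → Spec_validate_unique_names names field_name (validate_unique_names names field_name)

-- ===== LEMMAS AND PROOFS =====

-- in a strictly increasing list the last element bounds every element
lemma pairwise_last_le : ∀ (acc : List String), acc.Pairwise (· < ·) →
    ∀ m, acc.getLast? = some m → ∀ d ∈ acc, d ≤ m := by
  intro acc
  induction acc with
  | nil => simp
  | cons a t ih =>
    intro h m hm d hd
    cases t with
    | nil =>
      simp at hm hd; simp [hd, hm]
    | cons b u =>
      rw [List.pairwise_cons] at h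
      have hm' : (b :: u).getLast? = some m := by
        simpa [List.getLast?_cons_cons] using hm
      rcases List.mem_cons.mp hd with rfl | hd
      · have hbm : b ≤ m := ih h.2 m hm' b (by simp)
        exact le_of_lt (lt_of_lt_of_le (h.1 b (by simp)) hbm)
      · exact ih h.2 m hm' d hd

-- invariant of B's scan loop over a (≤)-sorted tail
lemma scan_main (l : List String) : ∀ (acc : List String) (p : String),
    l.Pairwise (· ≤ ·) → acc.Pairwise (· < ·) → (∀ d ∈ acc, d ≤ p) → (∀ y ∈ l, p ≤ y) →
    (l.foldl bstep (acc, some p)).1.Pairwise (· < ·) ∧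
    ∀ x, x ∈ (l.foldl bstep (acc, some p)).1 ↔ x ∈ acc ∨ (x = p ∧ x ∈ l) ∨ 2 ≤ l.count x := by
  induction l with
  | nil =>
    intro acc p _ hacc _ _
    refine ⟨hacc, ?_⟩
    simp
  | cons y t ih =>
    intro acc p hsort hacc hle hpl
    rw [List.pairwise_cons] at hsort
    have hpy : p ≤ y := hpl y (by simp)
    by_cases hyp : y = p
    · by_cases hg : acc = [] ∨ acc.getLast? ≠ some y
      · -- duplicate appended
        have hstep : bstep (acc, some p) y = (acc ++ [y], some y) := by
          simp only [bstep]
          rw [if_pos ⟨hyp, hg⟩]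
        have hlt : ∀ d ∈ acc, d < y := by
          intro d hd
          rcases hg with hg | hg
          · simp [hg] at hd
          · have hne : acc ≠ [] := List.ne_nil_of_mem hd
            obtain ⟨m, hm⟩ : ∃ m, acc.getLast? = some m := by
              cases hm : acc.getLast? with
              | none => exact absurd (List.getLast?_eq_none_iff.mp hm) hne
              | some m => exact ⟨m, rfl⟩
            have hdm := pairwise_last_le acc hacc m hm d hd
            have hmy : m ≤ y := hyp ▸ hle m (List.mem_of_getLast? hm)
            have hmny : m ≠ y := fun h => hg (h ▸ hm)
            exact lt_of_le_of_lt hdm (lt_of_le_of_ne hmy hmny)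
        have hacc' : (acc ++ [y]).Pairwise (· < ·) := by
          rw [List.pairwise_append]
          exact ⟨hacc, by simp, by simpa using hlt⟩
        have hle' : ∀ d ∈ acc ++ [y], d ≤ y := by
          intro d hd; rcases List.mem_append.mp hd with hd | hd
          · exact le_of_lt (hlt d hd)
          · simp at hd; simp [hd]
        obtain ⟨hpw, hmem⟩ := ih (acc ++ [y]) y hsort.2 hacc' hle' hsort.1
        rw [List.foldl_cons, hstep]
        refine ⟨hpw, ?_⟩
        intro x
        rw [hmem x]
        by_cases hx : x = y
        · subst hx; simp [hyp.symm]
        · have hxp : x ≠ p := fun h => hx (h.trans hyp.symm)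
          simp [hx, hxp, Ne.symm hx]
      · -- duplicate, but already the last recorded one
        rw [not_or, not_not] at hg
        have hstep : bstep (acc, some p) y = (acc, some y) := by
          simp only [bstep]
          rw [if_neg]
          rintro ⟨-, h2⟩
          exact h2.elim hg.1 (fun hh => hh hg.2)
        have hyacc : y ∈ acc := List.mem_of_getLast? hg.2
        obtain ⟨hpw, hmem⟩ := ih acc y hsort.2 hacc (fun d hd => hyp ▸ hle d hd) hsort.1
        rw [List.foldl_cons, hstep]
        refine ⟨hpw, ?_⟩
        intro x
        rw [hmem x]
        by_cases hx : x = y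
        · subst hx; simp [hyacc]
        · have hxp : x ≠ p := fun h => hx (h.trans hyp.symm)
          simp [hx, hxp, Ne.symm hx]
    · -- a fresh value becomes the new prev
      have hstep : bstep (acc, some p) y = (acc, some y) := by
        simp [bstep, hyp]
      have hple : ∀ d ∈ acc, d ≤ y := fun d hd => le_trans (hle d hd) hpy
      obtain ⟨hpw, hmem⟩ := ih acc y hsort.2 hacc hple hsort.1
      rw [List.foldl_cons, hstep]
      refine ⟨hpw, ?_⟩
      intro x
      rw [hmem x]
      have hplt : p < y := lt_of_le_of_ne hpy (fun h => hyp h.symm)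
      by_cases hx : x = y
      · subst hx
        refine or_congr Iff.rfl ?_
        have hmid : ¬(x = p ∧ x ∈ x :: t) := fun h => hyp h.1
        rw [List.count_cons_self]
        simp only [hmid, false_or, true_and]
        rw [← List.count_pos_iff]
        omega
      · have hmid : ¬(x = p ∧ x ∈ y :: t) := by
          rintro ⟨rfl, hmem'⟩
          rcases List.mem_cons.mp hmem' with h | h
          · exact hx h
          · exact absurd (hsort.1 x h) (not_le.mpr hplt)
        have hmid' : ¬(x = p ∧ x ∈ t) := fun h => hmid ⟨h.1, List.mem_cons_of_mem _ h.2⟩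
        simp [hx, hmid', Ne.symm hx]

-- scan over the whole sorted list: strictly increasing, members = names occurring at least twice
lemma scan_all (s : List String) (hs : s.Pairwise (· ≤ ·)) :
    (s.foldl bstep ([], none)).1.Pairwise (· < ·) ∧
    ∀ x, x ∈ (s.foldl bstep ([], none)).1 ↔ 2 ≤ s.count x := by
  cases s with
  | nil => simp
  | cons y t =>
    rw [List.pairwise_cons] at hs
    have hstep : bstep (([] : List String), none) y = ([], some y) := rfl
    obtain ⟨hpw, hmem⟩ := scan_main t [] y hs.2 (by simp) (by simp) hs.1
    rw [List.foldl_cons, hstep]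
    refine ⟨hpw, ?_⟩
    intro x
    rw [hmem x]
    by_cases hx : x = y
    · subst hx
      simp only [List.not_mem_nil, false_or, true_and, List.count_cons_self]
      rw [← List.count_pos_iff]
      omega
    · simp [hx, Ne.symm hx]

-- A's duplicates list, computed through items_counter
lemma dupsA_eq (nc : List String) :
    (((PySem.Dict.counter nc).items.filter (fun p => decide ((1 : Int) < p.2))).map (·.1))
      = (PySem.Set.ofList nc).filter (fun k => decide ((1 : Int) < (nc.count k : Int))) := by
  rw [PySem.Dict.items_counter, List.filter_map, List.map_map]
  simp [Function.comp_def]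

-- the two duplicate lists agree: sorted(A's) = B's scan output
lemma dups_eq (nc : List String) :
    PySem.List.sorted (((PySem.Dict.counter nc).items.filter (fun p => decide ((1 : Int) < p.2))).map (·.1)) (fun x => x) false
      = ((PySem.List.sorted nc (fun x => x) false).foldl bstep ([], none)).1 ∧
    ((((PySem.Dict.counter nc).items.filter (fun p => decide ((1 : Int) < p.2))).map (·.1)) = []
      ↔ ((PySem.List.sorted nc (fun x => x) false).foldl bstep ([], none)).1 = []) := by
  have hsp : (PySem.List.sorted nc (fun x => x) false).Pairwise (· ≤ ·) :=
    PySem.List.sorted_pairwise nc (fun x => x) 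
  obtain ⟨hpwB, hmemB⟩ := scan_all _ hsp
  have hcnt : ∀ x, (PySem.List.sorted nc (fun x => x) false).count x = nc.count x :=
    fun x => (PySem.List.sorted_perm nc (fun x => x) false).count_eq x
  have hmemA : ∀ x, x ∈ (((PySem.Dict.counter nc).items.filter (fun p => decide ((1 : Int) < p.2))).map (·.1)) ↔ 2 ≤ nc.count x := by
    intro x
    rw [dupsA_eq]
    simp only [List.mem_filter, PySem.Set.mem_ofList, decide_eq_true_eq]
    constructor
    · rintro ⟨-, h⟩; exact_mod_cast h
    · intro h
      exact ⟨List.count_pos_iff.mp (by omega), by exact_mod_cast h⟩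
  have hndA : (((PySem.Dict.counter nc).items.filter (fun p => decide ((1 : Int) < p.2))).map (·.1)).Nodup := by
    rw [dupsA_eq]
    exact (PySem.Set.nodup_ofList nc).filter _
  have hndB : ((PySem.List.sorted nc (fun x => x) false).foldl bstep ([], none)).1.Nodup :=
    hpwB.imp (fun h => ne_of_lt h)
  have hperm : ((PySem.List.sorted nc (fun x => x) false).foldl bstep ([], none)).1.Perm
      (((PySem.Dict.counter nc).items.filter (fun p => decide ((1 : Int) < p.2))).map (·.1)) :=
    (List.perm_ext_iff_of_nodup hndB hndA).mpr (fun x => by rw [hmemB x, hcnt x, hmemA x])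
  refine ⟨PySem.List.sorted_eq_of_perm_of_pairwise_lt _ _ (fun x => x) hperm hpwB, ?_⟩
  constructor
  · intro h; exact List.Perm.eq_nil (h ▸ hperm)
  · intro h; exact List.Perm.eq_nil ((h ▸ hperm).symm)

lemma ports_eq (names : List String) (field_name : String) :
    validate_unique_names names field_name = validate_unique_names_alt names field_name := by
  unfold validate_unique_names validate_unique_names_alt
  obtain ⟨hkey, hnil⟩ := dups_eq ((names.filter (fun name => PySem.Str.strip name ≠ "")).map PySem.Str.strip)
  simp only []
  rw [hkey]
  by_cases hA : (((PySem.Dict.counter ((names.filter (fun name => PySem.Str.strip name ≠ "")).map PySem.Str.strip)).items.filter (fun p => decide ((1 : Int) < p.2))).map (·.1)) = []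
  · have h1 := not_not_intro hA
    have h2 := not_not_intro (hnil.mp hA)
    rw [if_neg h1, if_neg h2]
  · have h2 : ((PySem.List.sorted ((names.filter (fun name => PySem.Str.strip name ≠ "")).map PySem.Str.strip) (fun x => x) false).foldl bstep ([], none)).1 ≠ [] :=
      fun hh => hA (hnil.mpr hh)
    rw [if_pos hA, if_pos h2]

-- ===== VERDICT (by name: the statement is the Claim_ definition above) =====
theorem validate_unique_names_spec : Claim_equal_validate_unique_names := by
  intro names field_name _
  unfold Spec_validate_unique_names
  exact ports_eq names field_name
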